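-- pv_equiv track=rewrite | github.com/Smonto-06/organizacionComputadores | proyecto3/HackAssembler/src/HackAssembler.py | normalizar_dest
-- ===== SOURCE A (Python) =====
-- def normalizar_dest(destino):
--     if destino == "":
--         return ""
--
--     permitidos = {"A", "D", "M"}
--     vistos = []
--     for caracter in destino:
--         if caracter not in permitidos or caracter in vistos:
--             return None
--         vistos.append(caracter)
--
--     grupo = set(vistos)
--     if grupo == {"A"}:
--         return "A"
--     if grupo == {"D"}:
--         return "D"
--     if grupo == {"M"}:
--         return "M"
--     if grupo == {"A", "D"}:
--         return "AD"
--     if grupo == {"A", "M"}: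
--         return "AM"
--     if grupo == {"D", "M"}:
--         return "MD"
--     if grupo == {"A", "D", "M"}:
--         return "AMD"
--     return None
-- ===== SOURCE B (Python) =====
-- def normalizar_dest(destino):
--     seen = set()
--     for c in destino:
--         if c not in "ADM" or c in seen:
--             return None
--         seen.add(c)
--     return "".join(c for c in "AMD" if c in seen)
-- ===== Notes on version B (the rewrite author's own statement) =====
-- stated objective: simpler
-- what changed: Replaced the seven set-equality branches by generating the mnemonic directly as a filter of the canonical character order against the set of seen characters; the empty case falls out of the empty join instead of a special-cased early return.
import Mathlib
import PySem

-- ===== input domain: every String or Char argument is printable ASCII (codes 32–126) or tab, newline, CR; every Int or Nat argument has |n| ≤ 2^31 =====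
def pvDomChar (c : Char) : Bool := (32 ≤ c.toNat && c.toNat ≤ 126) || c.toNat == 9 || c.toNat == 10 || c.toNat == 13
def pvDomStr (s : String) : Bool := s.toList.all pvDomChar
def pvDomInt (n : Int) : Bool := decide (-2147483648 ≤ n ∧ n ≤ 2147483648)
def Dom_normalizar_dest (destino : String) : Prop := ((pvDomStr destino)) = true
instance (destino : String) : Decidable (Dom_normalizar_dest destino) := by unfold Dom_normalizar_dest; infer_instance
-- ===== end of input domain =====

-- B replaces A's seven set-equality branches by an ordered filter of "AMD" against
-- the seen-character set (objective: simpler); return value only, A is pure.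

-- ===== PORT A =====
def pvPermitidos : PySem.Set Char := PySem.Set.ofList ['A', 'D', 'M']

-- the for-loop of A: early 'return None' or the final 'vistos'
def pvLoopA : List Char → List Char → Option (List Char)
  | [], vistos => some vistos
  | c :: rest, vistos =>
    if !(PySem.Set.contains pvPermitidos c) || vistos.contains c then none
    else pvLoopA rest (vistos ++ [c])

-- the chain of 'if grupo == {…}' branches
def pvTableA (grupo : PySem.Set Char) : Option String :=
  if PySem.Set.equal grupo (PySem.Set.ofList ['A']) then some "A"
  else if PySem.Set.equal grupo (PySem.Set.ofList ['D']) then some "D"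
  else if PySem.Set.equal grupo (PySem.Set.ofList ['M']) then some "M"
  else if PySem.Set.equal grupo (PySem.Set.ofList ['A', 'D']) then some "AD"
  else if PySem.Set.equal grupo (PySem.Set.ofList ['A', 'M']) then some "AM"
  else if PySem.Set.equal grupo (PySem.Set.ofList ['D', 'M']) then some "MD"
  else if PySem.Set.equal grupo (PySem.Set.ofList ['A', 'D', 'M']) then some "AMD"
  else none

def normalizar_dest (destino : String) : Option String :=
  if destino == "" then some ""
  else
    match pvLoopA destino.toList [] with
    | none => none
    | some vistos => pvTableA (PySem.Set.ofList vistos)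

-- ===== PORT B =====
-- the validation loop of B ('c not in "ADM"' is single-char membership, exact here)
def pvLoopB : List Char → PySem.Set Char → Option (PySem.Set Char)
  | [], seen => some seen
  | c :: rest, seen =>
    if !(("ADM".toList).contains c) || PySem.Set.contains seen c then none
    else pvLoopB rest (PySem.Set.add seen c)

def normalizar_dest_alt (destino : String) : Option String :=
  match pvLoopB destino.toList PySem.Set.empty with
  | none => none
  | some seen =>
      some (String.mk (("AMD".toList).filter (fun c => PySem.Set.contains seen c)))

-- ===== PRECONDITION & SPEC =====
def Spec_normalizar_dest (destino : String) (out : Option String) : Prop := out = normalizar_dest_alt destino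
instance (destino : String) (out : Option String) : Decidable (Spec_normalizar_dest destino out) := by unfold Spec_normalizar_dest; infer_instance

-- ===== CLAIM (what is proved, stated in full; the proofs are below) =====
def Claim_equal_normalizar_dest : Prop := ∀ (destino : String), Dom_normalizar_dest destino → Spec_normalizar_dest destino (normalizar_dest destino)

-- ===== LEMMAS AND PROOFS =====

theorem pv_ADM : "ADM".toList = ['A','D','M'] := by decide
theorem pv_AMD : "AMD".toList = ['A','M','D'] := by decide

theorem pv_equal_false_left (v l : List Char) (x : Char) (hx : x ∈ v) (hnx : x ∉ l) :
    PySem.Set.equal v l = false := by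
  cases h : PySem.Set.equal v l with
  | false => rfl
  | true => exact absurd (((PySem.Set.equal_iff v l).mp h x).mp hx) hnx

theorem pv_equal_true (v l : List Char) (h1 : ∀ x ∈ v, x ∈ l) (h2 : ∀ x ∈ l, x ∈ v) :
    PySem.Set.equal v l = true :=
  (PySem.Set.equal_iff v l).mpr (fun x => ⟨h1 x, h2 x⟩)

-- the branch table equals the ordered filter, for any nonempty nodup subset of {A,D,M}
theorem pv_table_eq (v s : List Char)
    (hnd : v.Nodup) (hsub : ∀ x ∈ v, x ∈ (['A','D','M'] : List Char)) (hne : v ≠ [])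
    (hs : ∀ x, x ∈ s ↔ x ∈ v) :
    pvTableA (PySem.Set.ofList v) =
      some (String.mk (("AMD".toList).filter (fun c => PySem.Set.contains s c))) := by
  rw [PySem.Set.ofList_eq_self_of_nodup v hnd, pv_AMD]
  have oA : PySem.Set.ofList (['A'] : List Char) = ['A'] := by decide
  have oD : PySem.Set.ofList (['D'] : List Char) = ['D'] := by decide
  have oM : PySem.Set.ofList (['M'] : List Char) = ['M'] := by decide
  have oAD : PySem.Set.ofList (['A','D'] : List Char) = ['A','D'] := by decide
  have oAM : PySem.Set.ofList (['A','M'] : List Char) = ['A','M'] := by decide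
  have oDM : PySem.Set.ofList (['D','M'] : List Char) = ['D','M'] := by decide
  have oADM : PySem.Set.ofList (['A','D','M'] : List Char) = ['A','D','M'] := by decide
  have hv3 : ∀ x ∈ v, x = 'A' ∨ x = 'D' ∨ x = 'M' := fun x hx => by simpa using hsub x hx
  by_cases hA : 'A' ∈ v <;> by_cases hD : 'D' ∈ v <;> by_cases hM : 'M' ∈ v
  · -- {A,D,M}
    simp only [pvTableA, oA, oD, oM, oAD, oAM, oDM, oADM,
      pv_equal_false_left v ['A'] 'D' hD (by decide),
      pv_equal_false_left v ['D'] 'A' hA (by decide),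
      pv_equal_false_left v ['M'] 'A' hA (by decide),
      pv_equal_false_left v ['A','D'] 'M' hM (by decide),
      pv_equal_false_left v ['A','M'] 'D' hD (by decide),
      pv_equal_false_left v ['D','M'] 'A' hA (by decide),
      pv_equal_true v ['A','D','M'] hsub
        (by intro x hx; simp at hx; rcases hx with rfl | rfl | rfl <;> assumption)]
    simp [List.filter, hs, hA, hD, hM]
    decide
  · -- {A,D}
    simp only [pvTableA, oA, oD, oM, oAD, oAM, oDM, oADM,
      pv_equal_false_left v ['A'] 'D' hD (by decide),
      pv_equal_false_left v ['D'] 'A' hA (by decide),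
      pv_equal_false_left v ['M'] 'A' hA (by decide),
      pv_equal_true v ['A','D']
        (by intro x hx; rcases hv3 x hx with rfl | rfl | rfl <;> simp_all)
        (by intro x hx; simp at hx; rcases hx with rfl | rfl <;> assumption)]
    simp [List.filter, hs, hA, hD, hM]
    decide
  · -- {A,M}
    simp only [pvTableA, oA, oD, oM, oAD, oAM, oDM, oADM,
      pv_equal_false_left v ['A'] 'M' hM (by decide),
      pv_equal_false_left v ['D'] 'A' hA (by decide),
      pv_equal_false_left v ['M'] 'A' hA (by decide),
      pv_equal_false_left v ['A','D'] 'M' hM (by decide),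
      pv_equal_true v ['A','M']
        (by intro x hx; rcases hv3 x hx with rfl | rfl | rfl <;> simp_all)
        (by intro x hx; simp at hx; rcases hx with rfl | rfl <;> assumption)]
    simp [List.filter, hs, hA, hD, hM]
    decide
  · -- {A}
    simp only [pvTableA, oA, oD, oM, oAD, oAM, oDM, oADM,
      pv_equal_true v ['A']
        (by intro x hx; rcases hv3 x hx with rfl | rfl | rfl <;> simp_all)
        (by intro x hx; simp at hx; subst hx; assumption)]
    simp [List.filter, hs, hA, hD, hM]
    decide
  · -- {D,M}
    simp only [pvTableA, oA, oD, oM, oAD, oAM, oDM, oADM,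
      pv_equal_false_left v ['A'] 'D' hD (by decide),
      pv_equal_false_left v ['D'] 'M' hM (by decide),
      pv_equal_false_left v ['M'] 'D' hD (by decide),
      pv_equal_false_left v ['A','D'] 'M' hM (by decide),
      pv_equal_false_left v ['A','M'] 'D' hD (by decide),
      pv_equal_true v ['D','M']
        (by intro x hx; rcases hv3 x hx with rfl | rfl | rfl <;> simp_all)
        (by intro x hx; simp at hx; rcases hx with rfl | rfl <;> assumption)]
    simp [List.filter, hs, hA, hD, hM]
    decide
  · -- {D}
    simp only [pvTableA, oA, oD, oM, oAD, oAM, oDM, oADM,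
      pv_equal_false_left v ['A'] 'D' hD (by decide),
      pv_equal_true v ['D']
        (by intro x hx; rcases hv3 x hx with rfl | rfl | rfl <;> simp_all)
        (by intro x hx; simp at hx; subst hx; assumption)]
    simp [List.filter, hs, hA, hD, hM]
    decide
  · -- {M}
    simp only [pvTableA, oA, oD, oM, oAD, oAM, oDM, oADM,
      pv_equal_false_left v ['A'] 'M' hM (by decide),
      pv_equal_false_left v ['D'] 'M' hM (by decide),
      pv_equal_true v ['M']
        (by intro x hx; rcases hv3 x hx with rfl | rfl | rfl <;> simp_all)
        (by intro x hx; simp at hx; subst hx; assumption)]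
    simp [List.filter, hs, hA, hD, hM]
    decide
  · -- empty: contradicts hne
    obtain ⟨x, hx⟩ := List.exists_mem_of_ne_nil v hne
    rcases hv3 x hx with rfl | rfl | rfl
    · exact absurd hx hA
    · exact absurd hx hD
    · exact absurd hx hM

theorem pv_loop_len (l : List Char) : ∀ (vistos v : List Char),
    pvLoopA l vistos = some v → vistos.length ≤ v.length := by
  induction l with
  | nil =>
      intro vistos v h
      simp only [pvLoopA, Option.some.injEq] at h
      simp [h]
  | cons c rest ih =>
      intro vistos v h
      simp only [pvLoopA] at h
      split at h
      · exact absurd h (by simp)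
      · have := ih _ _ h
        simp only [List.length_append, List.length_cons] at this ⊢
        omega

-- the two validation loops fail together, and on success yield the same character set
theorem pv_loop_rel (l : List Char) : ∀ (vistos : List Char) (seen : PySem.Set Char),
    (∀ x, x ∈ seen ↔ x ∈ vistos) → vistos.Nodup →
    (∀ x ∈ vistos, x ∈ (['A','D','M'] : List Char)) →
    (pvLoopA l vistos = none ∧ pvLoopB l seen = none) ∨
    (∃ v s, pvLoopA l vistos = some v ∧ pvLoopB l seen = some s ∧
      (∀ x, x ∈ s ↔ x ∈ v) ∧ v.Nodup ∧ (∀ x ∈ v, x ∈ (['A','D','M'] : List Char)) ∧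
      (v = [] → l = [] ∧ vistos = [])) := by
  induction l with
  | nil =>
      intro vistos seen hmem hnd hsub
      exact Or.inr ⟨vistos, seen, rfl, rfl, hmem, hnd, hsub, fun h => ⟨rfl, h⟩⟩
  | cons c rest ih =>
      intro vistos seen hmem hnd hsub
      have hperm : PySem.Set.contains pvPermitidos c = ("ADM".toList).contains c := by
        rw [pv_ADM]
        by_cases h : c ∈ (['A','D','M'] : List Char) <;>
          simp [pvPermitidos, PySem.Set.mem_ofList, h]
      have hseen : PySem.Set.contains seen c = vistos.contains c := by
        by_cases h : c ∈ vistos <;> simp [hmem, h]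
      simp only [pvLoopA, pvLoopB, hperm, hseen]
      by_cases hg : (!(("ADM".toList).contains c) || vistos.contains c) = true
      · rw [if_pos hg, if_pos hg]; exact Or.inl ⟨rfl, rfl⟩
      · rw [if_neg hg, if_neg hg]
        rw [pv_ADM] at hg
        simp only [Bool.or_eq_true, Bool.not_eq_true', not_or, Bool.not_eq_false] at hg
        obtain ⟨hin, hnin⟩ := hg
        have hcin : c ∈ (['A','D','M'] : List Char) := by simpa using hin
        have hcnin : c ∉ vistos := by simpa using hnin
        have h1 : ∀ x, x ∈ PySem.Set.add seen c ↔ x ∈ vistos ++ [c] := by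
          intro x; simp [PySem.Set.mem_add, hmem]
        have h2 : (vistos ++ [c]).Nodup := by
          refine hnd.append (List.nodup_singleton c) ?_
          intro a ha hb
          rw [List.mem_singleton] at hb
          subst hb; exact hcnin ha
        have h3 : ∀ x ∈ vistos ++ [c], x ∈ (['A','D','M'] : List Char) := by
          intro x hx
          rcases List.mem_append.mp hx with h | h
          · exact hsub x h
          · simp only [List.mem_singleton] at h; exact h ▸ hcin
        rcases ih (vistos ++ [c]) (PySem.Set.add seen c) h1 h2 h3 with h | ⟨v, s, ha, hb, hm, hn, hsb, _⟩
        · exact Or.inl h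
        · refine Or.inr ⟨v, s, ha, hb, hm, hn, hsb, fun hv => ?_⟩
          exfalso
          have hvle : (vistos ++ [c]).length ≤ v.length := pv_loop_len rest (vistos ++ [c]) v ha
          simp [hv] at hvle

-- ===== VERDICT (by name: the statement is the Claim_ definition above) =====
theorem normalizar_dest_spec : Claim_equal_normalizar_dest := by
  intro destino _
  unfold Spec_normalizar_dest
  by_cases h : destino = ""
  · subst h; decide
  · have hne : destino.toList ≠ [] := by
      intro hl
      exact h (String.toList_inj.mp (by simp [hl]))
    unfold normalizar_dest normalizar_dest_alt
    rw [if_neg (by simpa using h)]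
    rcases pv_loop_rel destino.toList [] PySem.Set.empty
        (by simp [PySem.Set.empty]) List.nodup_nil (by simp)
      with ⟨ha, hb⟩ | ⟨v, s, ha, hb, hm, hn, hsb, hv⟩
    · rw [ha, hb]
    -- success case:
    · simp only [ha, hb]
      have hvne : v ≠ [] := fun hveq => hne (hv hveq).1
      exact pv_table_eq v s hn hsb hvne hm
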